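-- pv_equiv track=rewrite | github.com/huokesi-0709/Mobibox-KB | monibox_kb/utils_json.py | repair_unclosed_brackets
-- ===== SOURCE A (Python) =====
-- def repair_unclosed_brackets(s: str) -> str:
--     """
--     自动补齐未闭合的括号。忽略字符串内部括号。
--     例如：{"a":[{"b":1}   -> 自动补成 {"a":[{"b":1}]}
--     """
--     stack = []
--     in_str = False
--     escape = False
--
--     for ch in s:
--         if in_str:
--             if escape:
--                 escape = False
--                 continue
--             if ch == "\\":
--                 escape = True
--                 continue
--             if ch == '"':
--                 in_str = False
--             continue
--
--         if ch == '"':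
--             in_str = True
--             continue
--
--         if ch in "{[":
--             stack.append(ch)
--         elif ch in "}]":
--             if stack:
--                 top = stack[-1]
--                 if (top == "{" and ch == "}") or (top == "[" and ch == "]"):
--                     stack.pop()
--                 else:
--                     # 括号类型不匹配，忽略（让 json5 去兜底）
--                     pass
--
--     closing = []
--     while stack:
--         top = stack.pop()
--         closing.append("}" if top == "{" else "]")
--     return s + "".join(closing)
-- ===== SOURCE B (Python) =====
-- def repair_unclosed_brackets(s: str) -> str:
--     # Pass 1: keep only characters outside string literals
--     # (a string literal is consumed to its closing quote or to EOF;
--     #  a backslash skips the next character).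
--     cleaned = []
--     i = 0
--     n = len(s)
--     while i < n:
--         c = s[i]
--         i += 1
--         if c == '"':
--             while i < n:
--                 d = s[i]
--                 i += 1
--                 if d == '\\':
--                     i += 1
--                 elif d == '"':
--                     break
--         else:
--             cleaned.append(c)
--     # Pass 2: match brackets on the cleaned, string-free text.
--     closer = {'{': '}', '[': ']'}
--     stack = []
--     for c in cleaned:
--         if c in closer:
--             stack.append(c)
--         elif c in '}]' and stack and closer.get(stack[-1]) == c:
--             stack.pop()
--     return s + ''.join('}' if c == '{' else ']' for c in reversed(stack))
-- ===== Notes on version B (the rewrite author's own statement) =====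
-- stated objective: alternative
-- what changed: Replaced A's single state-machine loop (in_str/escape flags threaded through bracket matching) by two separate passes: first strip string-literal contents, then match brackets on the cleaned text.
import Mathlib
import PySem

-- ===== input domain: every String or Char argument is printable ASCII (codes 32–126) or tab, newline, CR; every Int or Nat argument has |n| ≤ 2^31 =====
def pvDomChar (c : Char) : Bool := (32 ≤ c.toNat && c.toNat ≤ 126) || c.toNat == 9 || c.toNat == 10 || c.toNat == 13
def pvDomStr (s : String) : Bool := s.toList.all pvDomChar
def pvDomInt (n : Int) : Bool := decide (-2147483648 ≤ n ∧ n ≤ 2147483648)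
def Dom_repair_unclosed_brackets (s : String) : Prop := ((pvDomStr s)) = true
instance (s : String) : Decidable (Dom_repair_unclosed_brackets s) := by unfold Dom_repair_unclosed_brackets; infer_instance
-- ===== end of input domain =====

-- B restructures A's single state-machine loop into two passes (strip string
-- literals, then match brackets); same cost, different decomposition.

-- ===== PORT A =====
-- A's for-loop over s with state (stack, in_str, escape); stack is cons-based
-- (head = Python's stack[-1]), returning the final stack.
def aGo : List Char → List Char → Bool → Bool → List Char
  | [], st, _, _ => st
  | ch :: rest, st, inStr, esc =>
    if inStr then
      if esc then aGo rest st true false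
      else if ch = '\\' then aGo rest st true true
      else if ch = '"' then aGo rest st false esc
      else aGo rest st true esc
    else
      if ch = '"' then aGo rest st true esc
      else if ch = '{' ∨ ch = '[' then aGo rest (ch :: st) false esc
      else if ch = '}' ∨ ch = ']' then
        match st with
        | top :: st' =>
          if (top = '{' ∧ ch = '}') ∨ (top = '[' ∧ ch = ']') then aGo rest st' false esc
          else aGo rest st false esc
        | [] => aGo rest st false esc
      else aGo rest st false esc

-- A's trailing while-loop: pop each opener and append its closer.
def aClosing : List Char → List Char
  | [] => []
  | top :: rest => (if top = '{' then '}' else ']') :: aClosing rest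

def repair_unclosed_brackets (s : String) : String :=
  s ++ String.ofList (aClosing (aGo s.toList [] false false))

-- ===== PORT B =====
-- Pass 1 of Source B: the outer while-loop (stripStr) and the inner
-- string-skipping while-loop (skipStr).
mutual
def stripStr : List Char → List Char
  | [] => []
  | c :: rest => if c = '"' then skipStr rest else c :: stripStr rest

def skipStr : List Char → List Char
  | [] => []
  | d :: rest =>
    if d = '\\' then
      match rest with
      | [] => []
      | _ :: r => skipStr r
    else if d = '"' then stripStr rest
    else skipStr rest
end

def closerOpt (t : Char) : Option Char :=
  if t = '{' then some '}' else if t = '[' then some ']' else none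

-- Pass 2 of Source B: bracket matching over the cleaned text.
def mPass : List Char → List Char → List Char
  | [], st => st
  | c :: rest, st =>
    if c = '{' ∨ c = '[' then mPass rest (c :: st)
    else if c = '}' ∨ c = ']' then
      match st with
      | top :: st' => if closerOpt top = some c then mPass rest st' else mPass rest st
      | [] => mPass rest st
    else mPass rest st

def repair_unclosed_brackets_alt (s : String) : String :=
  s ++ String.ofList ((mPass (stripStr s.toList) []).map (fun c => if c = '{' then '}' else ']'))

-- ===== PRECONDITION & SPEC =====
def Spec_repair_unclosed_brackets (s : String) (out : String) : Prop := out = repair_unclosed_brackets_alt s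
instance (s : String) (out : String) : Decidable (Spec_repair_unclosed_brackets s out) := by unfold Spec_repair_unclosed_brackets; infer_instance

-- ===== CLAIM (what is proved, stated in full; the proofs are below) =====
def Claim_equal_repair_unclosed_brackets : Prop := ∀ (s : String), Dom_repair_unclosed_brackets s → Spec_repair_unclosed_brackets s (repair_unclosed_brackets s)

-- ===== LEMMAS AND PROOFS =====

lemma closerOpt_iff (t c : Char) :
    (closerOpt t = some c) ↔ ((t = '{' ∧ c = '}') ∨ (t = '[' ∧ c = ']')) := by
  unfold closerOpt
  by_cases h1 : t = '{' <;> by_cases h2 : t = '[' <;> simp [h1, h2] <;> aesop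

lemma aClosing_eq_map (l : List Char) :
    aClosing l = l.map (fun c => if c = '{' then '}' else ']') := by
  induction l with
  | nil => simp [aClosing]
  | cons t r ih => simp [aClosing, ih]

lemma key : ∀ (n : Nat) (l : List Char), l.length ≤ n → ∀ (st : List Char),
    aGo l st false false = mPass (stripStr l) st ∧
    aGo l st true false = mPass (skipStr l) st := by
  intro n
  induction n with
  | zero =>
    intro l hl st
    have : l = [] := by cases l <;> simp_all
    subst this
    simp [aGo, stripStr, skipStr, mPass]
  | succ n ih =>
    intro l hl st
    cases l with
    | nil => simp [aGo, stripStr, skipStr, mPass]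
    | cons c rest =>
      have hrest : rest.length ≤ n := by simpa using Nat.lt_succ_iff.mp (by simpa using hl)
      constructor
      · by_cases hq : c = '"'
        · subst hq
          simp [aGo, stripStr]
          exact (ih rest hrest st).2
        · by_cases ho : c = '{' ∨ c = '['
          · simp [aGo, stripStr, mPass, hq, ho]
            exact (ih rest hrest (c :: st)).1
          · by_cases hc : c = '}' ∨ c = ']'
            · cases st with
              | nil =>
                simp [aGo, stripStr, mPass, hq, ho, hc]
                exact (ih rest hrest []).1
              | cons top st' =>
                by_cases hm : (top = '{' ∧ c = '}') ∨ (top = '[' ∧ c = ']')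
                · have hm' : closerOpt top = some c := (closerOpt_iff top c).mpr hm
                  simp [aGo, stripStr, mPass, hq, ho, hc, hm, hm']
                  exact (ih rest hrest st').1
                · have hm' : ¬ closerOpt top = some c := fun h => hm ((closerOpt_iff top c).mp h)
                  simp [aGo, stripStr, mPass, hq, ho, hc, hm, hm']
                  exact (ih rest hrest (top :: st')).1
            · simp [aGo, stripStr, mPass, hq, ho, hc]
              exact (ih rest hrest st).1
      · by_cases hb : c = '\\'
        · subst hb
          cases rest with
          | nil => simp [aGo, skipStr, mPass]
          | cons d r =>
            have hr : r.length ≤ n := Nat.le_of_succ_le hrest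
            simp [aGo, skipStr]
            exact (ih r hr st).2
        · by_cases hq : c = '"'
          · subst hq
            have hs : skipStr ('"' :: rest) = stripStr rest := by
              rw [skipStr.eq_def]; simp
            rw [hs]
            simp [aGo]
            exact (ih rest hrest st).1
          · have hs : skipStr (c :: rest) = skipStr rest := by
              rw [skipStr.eq_def]; simp [hb, hq]
            rw [hs]
            simp [aGo, hb, hq]
            exact (ih rest hrest st).2

-- ===== VERDICT (by name: the statement is the Claim_ definition above) =====
theorem repair_unclosed_brackets_spec : Claim_equal_repair_unclosed_brackets := by
  intro s _
  unfold Spec_repair_unclosed_brackets repair_unclosed_brackets repair_unclosed_brackets_alt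
  rw [aClosing_eq_map, (key s.toList.length s.toList le_rfl []).1]
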